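-- pv_equiv track=rewrite | github.com/henryinqz/FindYourEV | FindYourEV/backend/main.py | get_models_from_power
-- ===== SOURCE A (Python) =====
-- from typing import TextIO, List, Dict, Union
--
-- CONSTANT = 0
--
-- POWER = ["power", 3]
--
-- HIGH_POWER = 300
--
-- NORMAL_POWER = 150
--
-- LOW_POWER = 0
--
-- def get_models_from_power(car_data: Dict, power: int) -> List[str]:
--     '''
--     power = [HIGH_POWER, NORMAL_POWER, LOW_POWER]
--     '''
--     models_from_search_power = []
--
--     for model in car_data:
--         model_data = car_data[model]
--
--         for power_level in power:
--             # HIGH_POWER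
--             if power_level == HIGH_POWER and model_data[POWER[CONSTANT]] >= HIGH_POWER:
--                 models_from_search_power.append(model)
--             # NORMAL_POWER
--             elif power_level == NORMAL_POWER and NORMAL_POWER <= model_data[POWER[CONSTANT]] < HIGH_POWER:
--                 models_from_search_power.append(model)
--             # LOWER POWER
--             elif power_level == LOW_POWER and LOW_POWER <= model_data[POWER[CONSTANT]] < NORMAL_POWER:
--                 models_from_search_power.append(model)
--
--     return models_from_search_power
-- ===== SOURCE B (Python) =====
-- def get_models_from_power(car_data, power):
--     '''
--     power = [HIGH_POWER, NORMAL_POWER, LOW_POWER]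
--     '''
--     # Stage 1: single pass over `power` building a multiplicity table for the
--     # three meaningful levels; other levels never match anything in A.
--     levels = [lvl for lvl in power if lvl in (300, 150, 0)]
--     counts = {}
--     for lvl in levels:
--         counts[lvl] = counts.get(lvl, 0) + 1
--     if not levels:
--         return []
--     # Stage 2: single pass over the models; no scan of `power` per model.
--     result = []
--     for model in car_data:
--         p = car_data[model]["power"]
--         if p >= 300:
--             k = counts.get(300, 0)
--         elif p >= 150:
--             k = counts.get(150, 0)
--         elif p >= 0:
--             k = counts.get(0, 0)
--         else:
--             k = 0
--         result += [model] * k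
--     return result
-- ===== Notes on version B (the rewrite author's own statement) =====
-- stated objective: faster
-- what changed: A re-scans the whole power list for every model, re-testing three range conditions per power_level; B makes two staged passes: one pass over power builds a multiplicity dict for the three meaningful levels, then one pass over the models appends each model the looked-up multiplicity of its bucket times, so the per-model scan of power disappears.
import Mathlib
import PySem

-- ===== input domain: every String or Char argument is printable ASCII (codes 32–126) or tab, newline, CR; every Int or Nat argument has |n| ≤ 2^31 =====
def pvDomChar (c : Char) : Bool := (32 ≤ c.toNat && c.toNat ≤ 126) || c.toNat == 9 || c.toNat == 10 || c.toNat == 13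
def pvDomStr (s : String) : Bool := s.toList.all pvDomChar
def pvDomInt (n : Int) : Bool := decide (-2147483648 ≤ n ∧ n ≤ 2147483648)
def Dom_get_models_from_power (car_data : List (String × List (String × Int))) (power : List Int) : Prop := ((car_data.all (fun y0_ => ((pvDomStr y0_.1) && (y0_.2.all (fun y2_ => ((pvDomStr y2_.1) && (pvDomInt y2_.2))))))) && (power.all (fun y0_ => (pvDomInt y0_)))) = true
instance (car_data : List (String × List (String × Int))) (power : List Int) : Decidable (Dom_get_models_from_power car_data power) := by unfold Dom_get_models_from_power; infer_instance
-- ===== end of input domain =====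

-- B replaces A's nested scan (whole `power` list re-tested per model) by two staged
-- passes: one pass over `power` builds a multiplicity table for the three meaningful
-- levels, then one pass over the models looks its bucket's multiplicity up once
-- (objective: faster, O(m+p) vs O(m*p)). Return-value equivalence; no mutation.

-- ===== PORT A =====
-- POWER[CONSTANT] is the string literal "power" (CONSTANT = 0, POWER = ["power", 3]); ported as that literal.
def get_models_from_power (car_data : List (String × List (String × Int))) (power : List Int) : List String :=
  car_data.foldl (fun acc md =>
    let model := md.1
    let model_data := PySem.Dict.mk md.2
    power.foldl (fun acc2 power_level =>
      if power_level == 300 && decide (model_data.getD "power" 0 ≥ 300) then acc2 ++ [model]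
      else if power_level == 150 && (decide (150 ≤ model_data.getD "power" 0) && decide (model_data.getD "power" 0 < 300)) then acc2 ++ [model]
      else if power_level == 0 && (decide (0 ≤ model_data.getD "power" 0) && decide (model_data.getD "power" 0 < 150)) then acc2 ++ [model]
      else acc2) acc) []

-- ===== PORT B =====
def get_models_from_power_alt (car_data : List (String × List (String × Int))) (power : List Int) : List String :=
  let levels := power.filter (fun lvl => lvl == 300 || lvl == 150 || lvl == 0)
  let counts := levels.foldl (fun d lvl => d.insert lvl (d.getD lvl 0 + 1)) PySem.Dict.empty
  if levels.isEmpty then []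
  else
    car_data.foldl (fun result md =>
      let p : Int := (PySem.Dict.mk md.2).getD "power" 0
      let k : Int :=
        if p ≥ 300 then counts.getD 300 0
        else if p ≥ 150 then counts.getD 150 0
        else if p ≥ 0 then counts.getD 0 0
        else 0
      result ++ List.replicate k.toNat md.1) []

-- ===== PRECONDITION & SPEC =====
-- Pre_ excludes inputs where some model's dict lacks the "power" key while `power`
-- requests a bucket level (300/150/0): there both A and B raise KeyError.
def Pre_get_models_from_power (car_data : List (String × List (String × Int))) (power : List Int) : Prop :=
  (∀ md ∈ car_data, (PySem.Dict.mk md.2).contains "power" = true) ∨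
    ((300:Int) ∉ power ∧ (150:Int) ∉ power ∧ (0:Int) ∉ power)
instance (car_data : List (String × List (String × Int))) (power : List Int) : Decidable (Pre_get_models_from_power car_data power) := by unfold Pre_get_models_from_power; infer_instance
def pvWitness_get_models_from_power : (List (String × List (String × Int))) × List Int :=
  ([("a", [("power", 320)]), ("b", [("power", 10)])], [300, 0])

def Spec_get_models_from_power (car_data : List (String × List (String × Int))) (power : List Int) (out : List String) : Prop := out = get_models_from_power_alt car_data power
instance (car_data : List (String × List (String × Int))) (power : List Int) (out : List String) : Decidable (Spec_get_models_from_power car_data power out) := by unfold Spec_get_models_from_power; infer_instance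

-- ===== CLAIM (what is proved, stated in full; the proofs are below) =====
def Claim_equal_get_models_from_power : Prop := ∀ (car_data : List (String × List (String × Int))) (power : List Int), Dom_get_models_from_power car_data power → Pre_get_models_from_power car_data power → Spec_get_models_from_power car_data power (get_models_from_power car_data power)

-- ===== LEMMAS AND PROOFS =====

-- the bucket of a power value, and the canonical form both programs reduce to
def pvBucket (v : Int) : Option Int :=
  if v ≥ 300 then some 300 else if v ≥ 150 then some 150 else if v ≥ 0 then some 0 else none

def pvCanon (car_data : List (String × List (String × Int))) (power : List Int) : List String :=
  car_data.foldl (fun acc md =>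
    acc ++ (match pvBucket ((PySem.Dict.mk md.2).getD "power" 0) with
            | some b => List.replicate (power.count b) md.1
            | none => [])) []

-- A's inner loop over `power` appends `model` once per power_level equal to the
-- bucket of v; i.e. it extends acc by (power.count bucket) copies of model.
theorem inner_loop_eq (power : List Int) (v : Int) (model : String) (acc : List String) :
    power.foldl (fun acc2 power_level =>
      if power_level == 300 && decide (v ≥ 300) then acc2 ++ [model]
      else if power_level == 150 && (decide (150 ≤ v) && decide (v < 300)) then acc2 ++ [model]
      else if power_level == 0 && (decide (0 ≤ v) && decide (v < 150)) then acc2 ++ [model]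
      else acc2) acc
    = acc ++ (match pvBucket v with
              | some b => List.replicate (power.count b) model
              | none => []) := by
  induction power generalizing acc with
  | nil => by_cases h3 : v ≥ 300 <;> by_cases h1 : v ≥ 150 <;> by_cases h0 : v ≥ 0 <;> simp [pvBucket, h3, h1, h0]
  | cons hd tl ih =>
    simp only [List.foldl_cons]
    rw [ih]
    by_cases h3 : v ≥ 300 <;> by_cases h1 : v ≥ 150 <;> by_cases h0 : v ≥ 0 <;>
      simp only [pvBucket, h3, h1, h0, if_pos, if_neg, not_false_iff, decide_true, decide_false] <;>
      by_cases hh : hd = 300 <;> by_cases hh1 : hd = 150 <;> by_cases hh0 : hd = 0 <;>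
        simp_all [List.replicate_succ, List.append_assoc] <;> omega

-- A computes the canonical form.
theorem A_eq_canon (car_data : List (String × List (String × Int))) (power : List Int) :
    get_models_from_power car_data power = pvCanon car_data power := by
  unfold get_models_from_power pvCanon
  apply PySem.List.foldl_congr_mem
  intro acc md _
  exact inner_loop_eq power _ md.1 acc

-- B's multiplicity table looks up exactly power.count b for the three levels.
theorem counts_getD (power : List Int) (b : Int) (hb : b = 300 ∨ b = 150 ∨ b = 0) :
    ((power.filter (fun lvl => lvl == 300 || lvl == 150 || lvl == 0)).foldl
      (fun d lvl => d.insert lvl (d.getD lvl 0 + 1)) PySem.Dict.empty).getD b 0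
      = (power.count b : Int) := by
  rw [PySem.Dict.getD_foldl_insert_add_one, PySem.Dict.getD_empty, zero_add]
  congr 1
  apply List.count_filter
  rcases hb with h | h | h <;> simp [h]

-- ===== VERDICT (by name: the statement is the Claim_ definition above) =====
theorem get_models_from_power_spec : Claim_equal_get_models_from_power := by
  intro car_data power _ _
  unfold Spec_get_models_from_power
  rw [A_eq_canon]
  unfold get_models_from_power_alt pvCanon
  simp only []
  by_cases hemp : (power.filter (fun lvl => lvl == 300 || lvl == 150 || lvl == 0)).isEmpty
  · rw [if_pos hemp]
    -- every relevant count is 0, so the canonical foldl never appends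
    have hcnt : ∀ b : Int, (b = 300 ∨ b = 150 ∨ b = 0) → power.count b = 0 := by
      intro b hb
      have := counts_getD power b hb
      rw [List.isEmpty_iff] at hemp
      rw [hemp] at this
      simp [PySem.Dict.getD_empty] at this
      omega
    rw [PySem.List.foldl_congr_mem _ _ (fun acc _ => acc) []]
    · exact List.foldl_fixed ..
    · intro acc md _
      set v := (PySem.Dict.mk md.2).getD "power" 0 with hv
      by_cases h3 : v ≥ 300 <;> by_cases h1 : v ≥ 150 <;> by_cases h0 : v ≥ 0 <;>
        simp [pvBucket, h3, h1, h0, hcnt 300 (Or.inl rfl), hcnt 150 (Or.inr (Or.inl rfl)),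
          hcnt 0 (Or.inr (Or.inr rfl))]
  · rw [if_neg hemp]
    apply PySem.List.foldl_congr_mem
    intro acc md _
    set v := (PySem.Dict.mk md.2).getD "power" 0 with hv
    by_cases h3 : v ≥ 300 <;> by_cases h1 : v ≥ 150 <;> by_cases h0 : v ≥ 0 <;>
      simp [pvBucket, h3, h1, h0, counts_getD power 300 (Or.inl rfl),
        counts_getD power 150 (Or.inr (Or.inl rfl)), counts_getD power 0 (Or.inr (Or.inr rfl))]
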